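-- pv_equiv track=rewrite | github.com/SaraBolouriB/approximately-vertex-cover | source/vertex_cover_methods.py | is_isolated_graph
-- ===== SOURCE A (Python) =====
-- def calculate_degrees(graph):
--     lenG = len(graph[0])
--     degree = [0 for i in range(lenG)]
--
--     for v in range(lenG):
--         deg = 0
--         if graph[v][0] == -1:
--             deg = -1
--         else:
--             for u in range(lenG):
--                 if graph[v][u] > 0 :
--                     deg += 1
--         degree[v] = deg
--     return degree
--
-- def is_isolated_graph(graph):
--     isolated_v = []             # Isolated vertices set
--     vertices = len(graph[0])    # Number of all vertices of orginal graph
--     all_degrees = calculate_degrees(graph=graph)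
--
--     no_verex = 0                # Number of vertices which are removed from graph
--     iso_count = 0               # Number of isolated vertices
--     for vertex in range(vertices):
--         if all_degrees[vertex] == -1:
--             no_verex += 1
--         elif all_degrees[vertex] == 0:
--             iso_count += 1
--             isolated_v.append(vertex)
--     vertices -= no_verex
--     is_iso = True if vertices == iso_count else False
--     return is_iso, isolated_v
-- ===== SOURCE B (Python) =====
-- def is_isolated_graph(graph):
--     n = len(graph[0])
--     isolated_v = []
--     all_isolated = True
--     for v in range(n):
--         row = graph[v]
--         if row[0] == -1:
--             continue
--         if any(x > 0 for x in row[:n]):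
--             all_isolated = False
--         else:
--             isolated_v.append(v)
--     return all_isolated, isolated_v
-- ===== Notes on version B (the rewrite author's own statement) =====
-- stated objective: simpler
-- what changed: A materialises a full degree table in a helper and re-scans it in a second counting pass with two counters and a final arithmetic comparison; B is a single pass with no degree table: per non-removed vertex it only asks whether any entry of row[:n] is positive, maintaining a running all-isolated flag and the isolated list.
import Mathlib
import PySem

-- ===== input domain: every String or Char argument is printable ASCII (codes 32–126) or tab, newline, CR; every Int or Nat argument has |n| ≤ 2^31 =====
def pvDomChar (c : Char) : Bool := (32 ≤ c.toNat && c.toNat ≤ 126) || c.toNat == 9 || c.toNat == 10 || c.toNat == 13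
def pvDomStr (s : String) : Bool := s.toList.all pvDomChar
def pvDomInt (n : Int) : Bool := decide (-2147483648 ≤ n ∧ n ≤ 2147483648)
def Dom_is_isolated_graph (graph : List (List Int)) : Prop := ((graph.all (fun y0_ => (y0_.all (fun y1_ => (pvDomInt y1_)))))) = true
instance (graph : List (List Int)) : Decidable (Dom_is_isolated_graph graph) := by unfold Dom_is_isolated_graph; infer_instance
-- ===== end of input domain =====

-- B merges A's two passes into one and drops the materialised degree table: per vertex it
-- only asks "any positive entry?" and keeps a running all-isolated flag (objective: simpler).

-- ===== PORT A =====
-- helper calculate_degrees: builds the full degree list (deg = -1 for removed rows)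
def calculate_degrees (graph : List (List Int)) : List Int :=
  let lenG : Int := (PySem.List.pyGetD graph 0 []).length
  let degree : List Int := (PySem.List.pyRange 0 lenG).map (fun _ => (0 : Int))
  (PySem.List.pyRange 0 lenG).foldl (fun degree v =>
    let row := PySem.List.pyGetD graph v []
    let deg : Int :=
      if PySem.List.pyGetD row 0 0 = -1 then -1
      else (PySem.List.pyRange 0 lenG).foldl (fun deg u =>
        if PySem.List.pyGetD row u 0 > 0 then deg + 1 else deg) 0
    degree.set v.toNat deg) degree

def is_isolated_graph (graph : List (List Int)) : Bool × List Int :=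
  let vertices : Int := (PySem.List.pyGetD graph 0 []).length
  let all_degrees := calculate_degrees graph
  let st := (PySem.List.pyRange 0 vertices).foldl
    (fun (st : List Int × Int × Int) vertex =>
      let (isolated_v, no_verex, iso_count) := st
      if PySem.List.pyGetD all_degrees vertex 0 = -1 then
        (isolated_v, no_verex + 1, iso_count)
      else if PySem.List.pyGetD all_degrees vertex 0 = 0 then
        (isolated_v ++ [vertex], no_verex, iso_count + 1)
      else (isolated_v, no_verex, iso_count))
    ([], 0, 0)
  let vertices := vertices - st.2.1
  ((if vertices = st.2.2 then true else false), st.1)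

-- ===== PORT B =====
def is_isolated_graph_alt (graph : List (List Int)) : Bool × List Int :=
  let n : Int := (PySem.List.pyGetD graph 0 []).length
  (PySem.List.pyRange 0 n).foldl
    (fun (st : Bool × List Int) v =>
      let row := PySem.List.pyGetD graph v []
      if PySem.List.pyGetD row 0 0 = -1 then st
      else if (PySem.List.slice row none (some n)).any (fun x => decide (x > 0)) then
        (false, st.2)
      else (st.1, st.2 ++ [v]))
    (true, [])

-- ===== PRECONDITION & SPEC =====
-- Pre_ = exactly where Python A returns: graph[0] exists, graph has at least n = len(graph[0]) rows,
-- each of the first n rows is nonempty, and any such row not starting with the -1 sentinel has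
-- length ≥ n (otherwise A's inner degree loop raises IndexError).
def Pre_is_isolated_graph (graph : List (List Int)) : Prop :=
  graph ≠ [] ∧
  (graph.headD []).length ≤ graph.length ∧
  ∀ v ∈ List.range (graph.headD []).length,
    graph.getD v [] ≠ [] ∧
    ((graph.getD v []).headD 0 = -1 ∨ (graph.headD []).length ≤ (graph.getD v []).length)
instance (graph : List (List Int)) : Decidable (Pre_is_isolated_graph graph) := by
  unfold Pre_is_isolated_graph; infer_instance

def pvWitness_is_isolated_graph : List (List Int) := [[0, 1], [1, 0]]

def Spec_is_isolated_graph (graph : List (List Int)) (out : Bool × List Int) : Prop :=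
  out = is_isolated_graph_alt graph
instance (graph : List (List Int)) (out : Bool × List Int) : Decidable (Spec_is_isolated_graph graph out) := by
  unfold Spec_is_isolated_graph; infer_instance

-- ===== CLAIM (what is proved, stated in full; the proofs are below) =====
def Claim_equal_is_isolated_graph : Prop := ∀ (graph : List (List Int)), Dom_is_isolated_graph graph → Pre_is_isolated_graph graph → Spec_is_isolated_graph graph (is_isolated_graph graph)


-- ===== LEMMAS AND PROOFS =====

-- the vertex-v degree A's helper stores (defaults make it total; under Pre_ it is Python's value)
def degF (graph : List (List Int)) (n : Nat) (v : Nat) : Int :=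
  if (graph.getD v []).getD 0 0 = -1 then -1
  else (((graph.getD v []).take n).countP (fun x => decide (0 < x)) : Int)

lemma inner_count (row : List Int) (n : Nat) :
    (List.range n).foldl (fun (deg : Int) (u : Nat) => if PySem.List.pyGetD row (u : Int) 0 > 0 then deg + 1 else deg) 0
      = ((row.take n).countP (fun x => decide (0 < x)) : Int) := by
  induction n with
  | zero => simp
  | succ k ih =>
    rw [List.range_succ, List.foldl_append]
    simp only [List.foldl_cons, List.foldl_nil, ih]
    by_cases h : k < row.length
    · rw [List.take_add_one, List.countP_append]
      rw [PySem.List.pyGetD_natCast, List.getD_eq_getElem?_getD, List.getElem?_eq_getElem h]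
      simp only [Option.toList_some, List.countP_singleton, Option.getD_some]
      push_cast
      simp only [decide_eq_true_eq, gt_iff_lt]
      split_ifs <;> omega
    · rw [List.take_of_length_le (by omega), List.take_of_length_le (by omega)]
      rw [PySem.List.pyGetD_natCast, List.getD_eq_getElem?_getD, List.getElem?_eq_none (by omega : row.length ≤ k)]
      simp

lemma setAll (f : Nat → Int) (m : Nat) (l : List Int) (h : m ≤ l.length) :
    (List.range m).foldl (fun (acc : List Int) (v : Nat) => acc.set v (f v)) l
      = (List.range m).map f ++ l.drop m := by
  induction m with
  | zero => simp
  | succ k ih =>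
    rw [List.range_succ, List.foldl_append, List.foldl_cons, List.foldl_nil,
        ih (by omega), List.set_append]
    have hlen : ((List.range k).map f).length = k := by simp
    rw [if_neg (by omega)]
    have : (l.drop k).set (k - ((List.range k).map f).length) (f k)
        = f k :: l.drop (k + 1) := by
      rw [hlen, Nat.sub_self]
      have hd : l.drop k = l[k] :: l.drop (k + 1) := List.drop_eq_getElem_cons (by omega)
      rw [hd, List.set_cons_zero]
    rw [this]; simp

lemma calc_deg_eq (graph : List (List Int)) :
    calculate_degrees graph
      = (List.range (PySem.List.pyGetD graph 0 []).length).map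
          (degF graph (PySem.List.pyGetD graph 0 []).length) := by
  unfold calculate_degrees
  simp only [PySem.List.pyRange_zero_natCast, List.foldl_map, List.map_map]
  rw [PySem.List.foldl_congr_mem _ _
    (fun (acc : List Int) (v : Nat) => acc.set v (degF graph (PySem.List.pyGetD graph 0 []).length v)) _ ?_]
  · rw [setAll _ _ _ (by simp)]
    simp
  · intro acc x hx
    simp only [Int.toNat_natCast]
    congr 1
    unfold degF
    rw [PySem.List.pyGetD_natCast graph x []]
    rw [PySem.List.pyGetD_ofNat']
    by_cases h : (graph.getD x []).getD 0 0 = -1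
    · rw [if_pos h, if_pos h]
    · rw [if_neg h, if_neg h]
      exact inner_count _ _

lemma joint_loop (cls : Nat → Int) (g : Nat → Bool)
    (hg : ∀ v, cls v ≠ -1 → (cls v = 0 ↔ g v = false)) (m : Nat) :
    (((List.range m).foldl
      (fun (st : List Int × Int × Int) (vertex : Nat) =>
        if cls vertex = -1 then (st.1, st.2.1 + 1, st.2.2)
        else if cls vertex = 0 then (st.1 ++ [(vertex : Int)], st.2.1, st.2.2 + 1)
        else st) ([], 0, 0)).1
      = ((List.range m).foldl
        (fun (st : Bool × List Int) (v : Nat) =>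
          if cls v = -1 then st
          else if g v then (false, st.2)
          else (st.1, st.2 ++ [(v : Int)])) (true, [])).2)
    ∧ ((List.range m).foldl
      (fun (st : List Int × Int × Int) (vertex : Nat) =>
        if cls vertex = -1 then (st.1, st.2.1 + 1, st.2.2)
        else if cls vertex = 0 then (st.1 ++ [(vertex : Int)], st.2.1, st.2.2 + 1)
        else st) ([], 0, 0)).2.1 +
      ((List.range m).foldl
      (fun (st : List Int × Int × Int) (vertex : Nat) =>
        if cls vertex = -1 then (st.1, st.2.1 + 1, st.2.2)
        else if cls vertex = 0 then (st.1 ++ [(vertex : Int)], st.2.1, st.2.2 + 1)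
        else st) ([], 0, 0)).2.2 ≤ (m : Int)
    ∧ (((List.range m).foldl
        (fun (st : Bool × List Int) (v : Nat) =>
          if cls v = -1 then st
          else if g v then (false, st.2)
          else (st.1, st.2 ++ [(v : Int)])) (true, [])).1
      = decide ((m : Int) =
        ((List.range m).foldl
      (fun (st : List Int × Int × Int) (vertex : Nat) =>
        if cls vertex = -1 then (st.1, st.2.1 + 1, st.2.2)
        else if cls vertex = 0 then (st.1 ++ [(vertex : Int)], st.2.1, st.2.2 + 1)
        else st) ([], 0, 0)).2.1 +
        ((List.range m).foldl
      (fun (st : List Int × Int × Int) (vertex : Nat) =>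
        if cls vertex = -1 then (st.1, st.2.1 + 1, st.2.2)
        else if cls vertex = 0 then (st.1 ++ [(vertex : Int)], st.2.1, st.2.2 + 1)
        else st) ([], 0, 0)).2.2)) := by
  induction m with
  | zero => simp
  | succ k ih =>
    obtain ⟨h1, h2, h3⟩ := ih
    rw [List.range_succ]
    simp only [List.foldl_append, List.foldl_cons, List.foldl_nil]
    by_cases hm : cls k = -1
    · rw [if_pos hm, if_pos hm]
      refine ⟨h1, by push_cast; push_cast at h2; omega, ?_⟩
      rw [h3, decide_eq_decide]
      constructor <;> intro hh <;> push_cast at * <;> omega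
    · have hgk := hg k hm
      by_cases h0 : cls k = 0
      · have hgf : g k = false := (hgk.mp h0)
        rw [if_neg hm, if_pos h0, if_neg hm, hgf]
        simp only [Bool.false_eq_true, if_false]
        refine ⟨by rw [h1], by push_cast; push_cast at h2; omega, ?_⟩
        rw [h3, decide_eq_decide]
        constructor <;> intro hh <;> push_cast at * <;> omega
      · have hgt : g k = true := by
          cases hgv : g k
          · exact absurd (hgk.mpr hgv) h0
          · rfl
        rw [if_neg hm, if_neg h0, if_neg hm, hgt]
        simp only [if_true]
        refine ⟨h1, by push_cast; push_cast at h2; omega, ?_⟩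
        symm
        rw [decide_eq_false_iff_not]
        push_cast at h2 ⊢
        omega

-- ===== VERDICT (by name: the statement is the Claim_ definition above) =====
theorem is_isolated_graph_spec : Claim_equal_is_isolated_graph := by
  intro graph _ _
  unfold Spec_is_isolated_graph is_isolated_graph is_isolated_graph_alt
  rw [calc_deg_eq]
  simp only [PySem.List.pyRange_zero_natCast, List.foldl_map]
  have hg : ∀ v, degF graph (PySem.List.pyGetD graph 0 []).length v ≠ -1 →
      (degF graph (PySem.List.pyGetD graph 0 []).length v = 0 ↔
        ((graph.getD v []).take (PySem.List.pyGetD graph 0 []).length).any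
          (fun x => decide (x > 0)) = false) := by
    intro v hv
    unfold degF at hv ⊢
    by_cases h : (graph.getD v []).getD 0 0 = -1
    · rw [if_pos h] at hv; exact absurd rfl hv
    · rw [if_neg h]
      simp [List.countP_eq_zero, List.any_eq_false]
  rw [PySem.List.foldl_congr_mem _ _ (fun (st : List Int × Int × Int) (vertex : Nat) =>
        if degF graph (PySem.List.pyGetD graph 0 []).length vertex = -1 then (st.1, st.2.1 + 1, st.2.2)
        else if degF graph (PySem.List.pyGetD graph 0 []).length vertex = 0 then (st.1 ++ [(vertex : Int)], st.2.1, st.2.2 + 1)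
        else st) _ ?_]
  · rw [PySem.List.foldl_congr_mem _ _ (fun (st : Bool × List Int) (v : Nat) =>
        if degF graph (PySem.List.pyGetD graph 0 []).length v = -1 then st
        else if ((graph.getD v []).take (PySem.List.pyGetD graph 0 []).length).any (fun x => decide (x > 0)) then (false, st.2)
        else (st.1, st.2 ++ [(v : Int)])) _ ?_]
    · obtain ⟨H1, H2, H3⟩ := joint_loop (degF graph (PySem.List.pyGetD graph 0 []).length)
        (fun v => ((graph.getD v []).take (PySem.List.pyGetD graph 0 []).length).any (fun x => decide (x > 0)))
        hg (PySem.List.pyGetD graph 0 []).length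
      rw [Prod.ext_iff]
      refine ⟨?_, H1⟩
      rw [H3]
      split_ifs with hc
      · symm; rw [decide_eq_true_iff]; omega
      · symm; rw [decide_eq_false_iff_not]; omega
    · intro acc y hy
      rw [PySem.List.pyGetD_natCast graph y [], PySem.List.pyGetD_ofNat',
          PySem.List.slice_to _ (Int.natCast_nonneg _), Int.toNat_natCast]
      unfold degF
      by_cases h : (graph.getD y []).getD 0 0 = -1
      · simp [h]
      · simp [h, if_neg (by omega : ¬((((graph.getD y []).take (PySem.List.pyGetD graph 0 []).length).countP (fun x => decide (0 < x)) : Int) = -1))]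
  · intro acc y hy
    have hy' := List.mem_range.mp hy
    rw [PySem.List.pyGetD_natCast, PySem.List.getD_map_range _ _ _ _ hy']
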